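-- pv_equiv track=rewrite | github.com/t-ed-c/zara | week-02-lexical-analysis/lexer.py | analyze_lexical
-- ===== SOURCE A (Python) =====
-- def analyze_lexical(content):
--     tokens = []
--     current_token = ""
--
--     for char in content:
--         if char.isspace():
--             if current_token:
--                 tokens.append(current_token)
--                 current_token = ""
--         elif char.isalnum() or char == '_':
--             current_token += char
--         else:
--             if current_token:
--                 tokens.append(current_token)
--                 current_token = ""
--             tokens.append(char)
--
--     if current_token:
--         tokens.append(current_token)
--
--     return tokens
-- ===== SOURCE B (Python) =====
-- def analyze_lexical(content):
--     # span-based scanner: classify each char, cut maximal runs of one class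
--     def cls(c):
--         if c.isspace():
--             return 0
--         return 1 if (c.isalnum() or c == '_') else 2
--
--     tokens = []
--     i, n = 0, len(content)
--     while i < n:
--         k = cls(content[i])
--         j = i
--         while j < n and cls(content[j]) == k:
--             j += 1
--         if k == 1:
--             tokens.append(content[i:j])
--         elif k == 2:
--             tokens.extend(content[i:j])
--         i = j
--     return tokens
-- ===== Notes on version B (the rewrite author's own statement) =====
-- stated objective: idiomatic
-- what changed: Replaced A's per-character accumulator loop (building current_token incrementally with flush logic in three branches) with a span scanner that classifies each character as space/word/punct and cuts the input into maximal runs of one class, emitting a word run as one token and a punct run as one token per character.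
import Mathlib
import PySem

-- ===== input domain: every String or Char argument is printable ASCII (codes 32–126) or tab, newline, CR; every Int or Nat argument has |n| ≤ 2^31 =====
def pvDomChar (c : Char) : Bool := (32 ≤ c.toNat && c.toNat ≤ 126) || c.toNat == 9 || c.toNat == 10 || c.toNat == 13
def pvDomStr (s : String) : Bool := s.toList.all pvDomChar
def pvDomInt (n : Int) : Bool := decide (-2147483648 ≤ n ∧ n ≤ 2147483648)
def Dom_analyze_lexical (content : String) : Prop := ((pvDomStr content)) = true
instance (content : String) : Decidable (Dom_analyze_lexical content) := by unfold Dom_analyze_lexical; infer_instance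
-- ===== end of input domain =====

-- ===== PORT A =====
-- B replaces A's per-char accumulator loop with a span scanner over maximal runs of one character class (idiomatic decomposition; same behaviour).
set_option maxHeartbeats 2000000

-- port of A: the for-loop as structural recursion over (tokens, current_token);
-- current_token is kept as a List Char and turned into a String exactly where Python appends it
def pvLoopA : List Char → List String → List Char → List String
  | [], toks, cur => if cur.isEmpty then toks else toks ++ [String.ofList cur]
  | c :: cs, toks, cur =>
    if PySem.Chars.isspace c then
      pvLoopA cs (if cur.isEmpty then toks else toks ++ [String.ofList cur]) []
    else if PySem.Chars.isalnum c || c == '_' then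
      pvLoopA cs toks (cur ++ [c])
    else
      pvLoopA cs ((if cur.isEmpty then toks else toks ++ [String.ofList cur]) ++ [String.ofList [c]]) []

def analyze_lexical (content : String) : List String :=
  pvLoopA content.toList [] []

-- ===== PORT B =====
-- classifier: 0 = space, 1 = word (alnum or '_'), 2 = punctuation
def pvCls (c : Char) : Nat :=
  if PySem.Chars.isspace c then 0
  else if PySem.Chars.isalnum c || c == '_' then 1 else 2

-- span scanner (Source B's while loop): cut the maximal run of the head's class, emit it, recurse
def pvScan : List Char → List String
  | [] => []
  | c :: cs =>
    let k := pvCls c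
    let run := c :: cs.takeWhile (fun x => pvCls x == k)
    let rem := cs.dropWhile (fun x => pvCls x == k)
    (if k == 1 then [String.ofList run]
     else if k == 2 then run.map (fun x => String.ofList [x])
     else []) ++ pvScan rem
termination_by cs => cs.length
decreasing_by exact Nat.lt_succ_of_le (List.length_dropWhile_le _ _)

def analyze_lexical_alt (content : String) : List String :=
  pvScan content.toList

-- ===== PRECONDITION & SPEC =====
def Spec_analyze_lexical (content : String) (out : List String) : Prop := out = analyze_lexical_alt content
instance (content : String) (out : List String) : Decidable (Spec_analyze_lexical content out) := by unfold Spec_analyze_lexical; infer_instance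

-- ===== CLAIM (what is proved, stated in full; the proofs are below) =====
def Claim_equal_analyze_lexical : Prop := ∀ (content : String), Dom_analyze_lexical content → Spec_analyze_lexical content (analyze_lexical content)

-- ===== LEMMAS AND PROOFS =====

theorem pvCls_space {c : Char} (h : pvCls c = 0) : PySem.Chars.isspace c = true := by
  unfold pvCls at h; split_ifs at h with h1 h2 <;> simp_all

theorem pvCls_word {c : Char} (h : pvCls c = 1) :
    PySem.Chars.isspace c = false ∧ (PySem.Chars.isalnum c || c == '_') = true := by
  unfold pvCls at h; split_ifs at h with h1 h2 <;> simp_all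

theorem pvCls_punct {c : Char} (h : pvCls c = 2) :
    PySem.Chars.isspace c = false ∧ (PySem.Chars.isalnum c || c == '_') = false := by
  unfold pvCls at h; split_ifs at h with h1 h2 <;> simp_all

theorem pvCls_cases (c : Char) : pvCls c = 0 ∨ pvCls c = 1 ∨ pvCls c = 2 := by
  unfold pvCls; split_ifs <;> simp

-- accumulator lemma for A's loop: the already-emitted tokens factor out
theorem pvLoopA_acc (cs : List Char) : ∀ toks cur,
    pvLoopA cs toks cur = toks ++ pvLoopA cs [] cur := by
  induction cs with
  | nil =>
    intro toks cur
    simp only [pvLoopA]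
    split_ifs <;> simp
  | cons c cs ih =>
    intro toks cur
    rw [pvLoopA, pvLoopA]
    by_cases h1 : PySem.Chars.isspace c
    · by_cases he : cur.isEmpty
      · rw [if_pos h1, if_pos h1, if_pos he, if_pos he, ih]
      · rw [if_pos h1, if_pos h1, if_neg he, if_neg he, ih, ih ([] ++ [String.ofList cur])]
        simp
    · by_cases h2 : (PySem.Chars.isalnum c || c == '_') = true
      · rw [if_neg h1, if_neg h1, if_pos h2, if_pos h2, ih]
      · by_cases he : cur.isEmpty
        · rw [if_neg h1, if_neg h1, if_neg h2, if_neg h2, if_pos he, if_pos he,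
            ih, ih ([] ++ [String.ofList [c]])]
          simp
        · rw [if_neg h1, if_neg h1, if_neg h2, if_neg h2, if_neg he, if_neg he,
            ih, ih ([] ++ [String.ofList cur] ++ [String.ofList [c]])]
          simp

-- a run of word chars just accumulates into current_token
theorem pvLoopA_wordRun : ∀ (run rest cur : List Char),
    (∀ c ∈ run, pvCls c = 1) →
    pvLoopA (run ++ rest) [] cur = pvLoopA rest [] (cur ++ run) := by
  intro run
  induction run with
  | nil => intro rest cur _; simp
  | cons c run ih =>
    intro rest cur h
    have hc := pvCls_word (h c (by simp))
    rw [List.cons_append, pvLoopA, if_neg (by simp [hc.1]), if_pos hc.2,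
      ih rest (cur ++ [c]) (fun x hx => h x (by simp [hx]))]
    simp

-- a run of spaces with empty current_token is skipped
theorem pvLoopA_spaceRun : ∀ (run rest : List Char),
    (∀ c ∈ run, pvCls c = 0) →
    pvLoopA (run ++ rest) [] [] = pvLoopA rest [] [] := by
  intro run
  induction run with
  | nil => intro rest _; simp
  | cons c run ih =>
    intro rest h
    have hc := pvCls_space (h c (by simp))
    rw [List.cons_append, pvLoopA, if_pos hc]
    exact ih rest (fun x hx => h x (by simp [hx]))

-- a run of punctuation with empty current_token emits one singleton token per char
theorem pvLoopA_punctRun : ∀ (run rest : List Char),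
    (∀ c ∈ run, pvCls c = 2) →
    pvLoopA (run ++ rest) [] [] = run.map (fun c => String.ofList [c]) ++ pvLoopA rest [] [] := by
  intro run
  induction run with
  | nil => intro rest _; simp
  | cons c run ih =>
    intro rest h
    have hc := pvCls_punct (h c (by simp))
    rw [List.cons_append, pvLoopA, if_neg (by simp [hc.1]), if_neg (by simp [hc.2])]
    simp only [List.isEmpty_nil, if_true, List.nil_append]
    rw [pvLoopA_acc, ih rest (fun x hx => h x (by simp [hx]))]
    simp

-- a nonempty current_token is flushed as one token when the next char (if any) is not a word char
theorem pvLoopA_flush (rest cur : List Char) (hcur : cur.isEmpty = false)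
    (hrest : ∀ c, rest.head? = some c → pvCls c ≠ 1) :
    pvLoopA rest [] cur = String.ofList cur :: pvLoopA rest [] [] := by
  cases rest with
  | nil => simp [pvLoopA, hcur]
  | cons c r =>
    have hk := hrest c rfl
    rcases pvCls_cases c with h0 | h1 | h2
    · have hc := pvCls_space h0
      simp only [pvLoopA, hc, if_true, hcur, Bool.false_eq_true, if_false, List.isEmpty_nil]
      rw [pvLoopA_acc]
      simp
    · exact absurd h1 hk
    · have hc := pvCls_punct h2
      simp only [pvLoopA, hc.1, hc.2, Bool.false_eq_true, if_false, hcur,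
        List.isEmpty_nil, if_true, List.nil_append]
      rw [pvLoopA_acc, pvLoopA_acc r [String.ofList [c]]]
      simp

theorem pv_head?_dropWhile {α : Type} (p : α → Bool) (l : List α) :
    ∀ x, (l.dropWhile p).head? = some x → p x = false := by
  induction l with
  | nil => simp
  | cons c cs ih =>
    intro x hx
    by_cases hc : p c
    · exact ih x (by simpa [List.dropWhile_cons, hc] using hx)
    · rw [List.dropWhile_cons, if_neg (by simpa using hc), List.head?_cons,
        Option.some.injEq] at hx
      rw [← hx]
      simpa using hc

theorem pvLoopA_eq_pvScan (cs : List Char) : pvLoopA cs [] [] = pvScan cs := by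
  induction cs using pvScan.induct with
  | case1 => rw [pvScan.eq_1]; rfl
  | case2 c cs kk rm ih =>
    rw [pvScan.eq_2]
    have hih : pvLoopA (cs.dropWhile (fun x => pvCls x == pvCls c)) [] []
        = pvScan (cs.dropWhile (fun x => pvCls x == pvCls c)) := ih
    have hdec : (c :: cs) = (c :: cs.takeWhile (fun x => pvCls x == pvCls c))
        ++ cs.dropWhile (fun x => pvCls x == pvCls c) := by
      rw [List.cons_append, List.takeWhile_append_dropWhile]
    have hrun : ∀ x ∈ (c :: cs.takeWhile (fun x => pvCls x == pvCls c)), pvCls x = pvCls c := by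
      intro x hx
      rcases List.mem_cons.mp hx with h | h
      · rw [h]
      · simpa using List.mem_takeWhile_imp h
    have hhead : ∀ x, (cs.dropWhile (fun x => pvCls x == pvCls c)).head? = some x →
        pvCls x ≠ pvCls c := by
      intro x hx
      simpa using pv_head?_dropWhile (fun x => pvCls x == pvCls c) cs x hx
    rcases pvCls_cases c with h0 | h1 | h2
    · conv_lhs => rw [hdec]
      rw [pvLoopA_spaceRun _ _ (fun x hx => by rw [hrun x hx, h0]), hih]
      simp [h0]
    · conv_lhs => rw [hdec]
      rw [pvLoopA_wordRun _ _ [] (fun x hx => by rw [hrun x hx, h1]), List.nil_append,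
        pvLoopA_flush _ _ rfl (fun x hx => by rw [← h1]; exact hhead x hx), hih]
      simp [h1]
    · conv_lhs => rw [hdec]
      rw [pvLoopA_punctRun _ _ (fun x hx => by rw [hrun x hx, h2]), hih]
      simp [h2]

-- ===== VERDICT (by name: the statement is the Claim_ definition above) =====
theorem analyze_lexical_spec : Claim_equal_analyze_lexical := by
  intro content _
  unfold Spec_analyze_lexical analyze_lexical analyze_lexical_alt
  exact pvLoopA_eq_pvScan content.toList
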